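-- pv_equiv track=rewrite | github.com/ChineseResearcher/l33tc0d3-dump | geometry/Q3001 Minimum Moves to Capture The Queen.py | minMovesToCaptureTheQueen
-- ===== SOURCE A (Python) =====
-- def minMovesToCaptureTheQueen(a: int, b: int, c: int, d: int, e: int, f: int) -> int:
--
--     ## check if we can achieve one move ##
--     # case 1)
--     # queen is on diagonal path of white bishop w/ no obstruction
--     if abs(c - e) == abs(d - f):
--         x_delta = (e-c) // abs(e-c)
--         y_delta = (f-d) // abs(f-d)
--
--         # form the path from bishop to queen
--         cx, cy = c, d
--         while (cx, cy) != (a, b):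
--
--             if (cx, cy) == (e, f):
--                 return 1
--
--             cx += x_delta
--             cy += y_delta
--
--     # case 2)
--     # queen is on the same row or col as white rook w/ no obstruction
--     if a == e:
--         y_delta = (f-b) // abs(f-b)
--
--         # form the colwise path from rook to queen
--         cx, cy = a, b
--         while (cx, cy) != (c, d):
--
--             if (cx, cy) == (e, f):
--                 return 1
--
--             cy += y_delta
--
--     if b == f:
--         x_delta = (e-a) // abs(e-a)
--
--         # form the rowwise path rook to queen
--         cx, cy = a, b
--         while (cx, cy) != (c, d):
--
--             if (cx, cy) == (e, f):
--                 return 1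
--
--             cx += x_delta
--
--     # otherwise, we can always achieve capture in 2 moves
--     return 2
-- ===== SOURCE B (Python) =====
-- def minMovesToCaptureTheQueen(a: int, b: int, c: int, d: int, e: int, f: int) -> int:
--     # closed-form line-of-sight tests instead of path-walking loops
--     def strictly_between(x, p, q):
--         return min(p, q) < x < max(p, q)
--
--     rook_hits = (a == e and not (c == a and strictly_between(d, b, f))) or \
--                 (b == f and not (d == b and strictly_between(c, a, e)))
--     bishop_hits = abs(c - e) == abs(d - f) and \
--                   not (abs(a - c) == abs(b - d) and
--                        strictly_between(a, c, e) and strictly_between(b, d, f))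
--     return 1 if rook_hits or bishop_hits else 2
-- ===== Notes on version B (the rewrite author's own statement) =====
-- stated objective: simpler
-- what changed: Replaced A's three square-by-square path-walking while-loops with closed-form collinearity and strict-betweenness predicates (min/max comparisons), returning 1 iff the rook or bishop has an unobstructed line to the queen.
-- outside the precondition, e.g. on minMovesToCaptureTheQueen(0, 0, 0, 0, 0, 5): A returns 2, B returns 1; on minMovesToCaptureTheQueen(0, 0, 1, 1, 0, 0): A raises ZeroDivisionError, B returns 1; on minMovesToCaptureTheQueen(0, 0, 1, 1, 1, 1): A raises ZeroDivisionError, B returns 1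
import Mathlib
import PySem

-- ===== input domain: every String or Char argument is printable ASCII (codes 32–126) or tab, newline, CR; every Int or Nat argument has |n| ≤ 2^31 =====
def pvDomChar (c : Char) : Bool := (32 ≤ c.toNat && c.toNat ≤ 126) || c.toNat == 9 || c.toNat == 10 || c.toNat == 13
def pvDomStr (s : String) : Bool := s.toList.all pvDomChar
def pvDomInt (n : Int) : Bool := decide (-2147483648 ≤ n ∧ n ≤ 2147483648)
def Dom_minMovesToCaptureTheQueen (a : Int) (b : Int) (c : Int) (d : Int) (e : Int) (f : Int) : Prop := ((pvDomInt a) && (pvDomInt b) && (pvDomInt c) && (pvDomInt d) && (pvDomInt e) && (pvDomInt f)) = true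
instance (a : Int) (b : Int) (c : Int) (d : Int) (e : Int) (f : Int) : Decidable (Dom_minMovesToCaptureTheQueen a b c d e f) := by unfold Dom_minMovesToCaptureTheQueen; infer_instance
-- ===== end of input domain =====

-- B replaces A's three square-by-square path-walking loops with closed-form
-- collinearity + strict-betweenness tests; objective: simpler.

-- ===== PORT A =====
-- One generic walker transcribes A's three structurally identical while-loops:
-- starting at (cx,cy) it checks exit at the blocker (p,q) first, then returns 1
-- at the queen (e,f), else steps by (sx,sy) — exactly A's loop body and order.
-- (A's column/row loops move only one coordinate: the other delta is 0.)
-- The fuel argument only makes the recursion structural; at every call site the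
-- fuel (distance to the queen + 1) provably suffices, so behaviour is identical.
def pvWalk (fuel : Nat) (p q e f sx sy cx cy : Int) : Option Int :=
  match fuel with
  | 0 => none
  | n + 1 =>
    if cx = p ∧ cy = q then none
    else if cx = e ∧ cy = f then some 1
    else pvWalk n p q e f sx sy (cx + sx) (cy + sy)

-- each case returns 1 when its walk reaches the queen, else falls through (getD)
def minMovesToCaptureTheQueen (a : Int) (b : Int) (c : Int) (d : Int) (e : Int) (f : Int) : Int :=
  -- case 1) bishop's diagonal toward the queen, exiting at the rook (a,b)
  (if (c - e).natAbs = (d - f).natAbs then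
      pvWalk ((e - c).natAbs + 1) a b e f
        (PySem.Int.floordiv (e - c) |e - c|) (PySem.Int.floordiv (f - d) |f - d|) c d
    else none).getD
  -- case 2) rook's column toward the queen, exiting at the bishop (c,d)
  ((if a = e then
      pvWalk ((f - b).natAbs + 1) c d e f 0 (PySem.Int.floordiv (f - b) |f - b|) a b
    else none).getD
  -- rook's row toward the queen, exiting at the bishop (c,d)
  ((if b = f then
      pvWalk ((e - a).natAbs + 1) c d e f (PySem.Int.floordiv (e - a) |e - a|) 0 a b
    else none).getD 2))

-- ===== PORT B =====
abbrev pvStrictlyBetween (x p q : Int) : Prop := min p q < x ∧ x < max p q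

def minMovesToCaptureTheQueen_alt (a : Int) (b : Int) (c : Int) (d : Int) (e : Int) (f : Int) : Int :=
  if ((a = e ∧ ¬(c = a ∧ pvStrictlyBetween d b f)) ∨
      (b = f ∧ ¬(d = b ∧ pvStrictlyBetween c a e))) ∨
     ((c - e).natAbs = (d - f).natAbs ∧
      ¬((a - c).natAbs = (b - d).natAbs ∧ pvStrictlyBetween a c e ∧ pvStrictlyBetween b d f))
  then 1 else 2

-- ===== PRECONDITION & SPEC =====
-- Pre_ requires the three pieces to stand on pairwise distinct squares (the only
-- positions the puzzle admits): A raises ZeroDivisionError when bishop = queen or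
-- rook = queen, and when rook = bishop both answers are defensible on an
-- ill-formed board (A lets a piece "block" from the attacker's own square), so
-- those coincident-piece inputs are excluded.
def Pre_minMovesToCaptureTheQueen (a : Int) (b : Int) (c : Int) (d : Int) (e : Int) (f : Int) : Prop :=
  ¬(a = c ∧ b = d) ∧ ¬(a = e ∧ b = f) ∧ ¬(c = e ∧ d = f)
instance (a : Int) (b : Int) (c : Int) (d : Int) (e : Int) (f : Int) : Decidable (Pre_minMovesToCaptureTheQueen a b c d e f) := by unfold Pre_minMovesToCaptureTheQueen; infer_instance

def pvWitness_minMovesToCaptureTheQueen : Int × Int × Int × Int × Int × Int := (1, 1, 3, 3, 1, 5)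

def Spec_minMovesToCaptureTheQueen (a : Int) (b : Int) (c : Int) (d : Int) (e : Int) (f : Int) (out : Int) : Prop := out = minMovesToCaptureTheQueen_alt a b c d e f
instance (a : Int) (b : Int) (c : Int) (d : Int) (e : Int) (f : Int) (out : Int) : Decidable (Spec_minMovesToCaptureTheQueen a b c d e f out) := by unfold Spec_minMovesToCaptureTheQueen; infer_instance

-- ===== CLAIM (what is proved, stated in full; the proofs are below) =====
def Claim_equal_minMovesToCaptureTheQueen : Prop := ∀ (a : Int) (b : Int) (c : Int) (d : Int) (e : Int) (f : Int), Dom_minMovesToCaptureTheQueen a b c d e f → Pre_minMovesToCaptureTheQueen a b c d e f → Spec_minMovesToCaptureTheQueen a b c d e f (minMovesToCaptureTheQueen a b c d e f)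

-- ===== LEMMAS AND PROOFS =====

lemma pvFloordiv_abs (x : Int) (hx : x ≠ 0) :
    PySem.Int.floordiv x |x| = if 0 < x then 1 else -1 := by
  by_cases h : 0 < x
  · rw [if_pos h, abs_of_pos h, PySem.Int.floordiv_eq_iff_of_pos (a:=x) (q:=1) h]
    omega
  · rw [if_neg h, abs_of_neg (by omega), PySem.Int.floordiv_eq_iff_of_pos (a:=x) (q:=-1) (by omega : (0:Int) < -x)]
    omega

lemma pvWalk_cases (fuel : Nat) (p q e f sx sy cx cy : Int) :
    pvWalk fuel p q e f sx sy cx cy = none ∨ pvWalk fuel p q e f sx sy cx cy = some 1 := by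
  induction fuel generalizing cx cy with
  | zero => exact Or.inl rfl
  | succ n ih =>
    simp only [pvWalk]
    split_ifs with h1 h2
    · exact Or.inl rfl
    · exact Or.inr rfl
    · exact ih _ _

lemma pvWalk_none_iff (p q e f sx sy : Int) (hs : ¬(sx = 0 ∧ sy = 0))
    (hpq : ¬(p = e ∧ q = f)) (K : Nat) :
    pvWalk (K + 1) p q e f sx sy (e - K * sx) (f - K * sy) = none ↔
      ∃ j : Nat, j ≤ K ∧ p = e - j * sx ∧ q = f - j * sy := by
  induction K with
  | zero =>
    simp only [Nat.cast_zero, zero_mul, sub_zero, pvWalk]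
    have h1 : ¬(e = p ∧ f = q) := fun ⟨h, h'⟩ => hpq ⟨h.symm, h'.symm⟩
    rw [if_neg h1]
    simp only [and_self, if_true]
    constructor
    · intro h; cases h
    · rintro ⟨j, hj, hp, hq⟩
      have hj0 : j = 0 := by omega
      subst hj0
      simp only [Nat.cast_zero, zero_mul, sub_zero] at hp hq
      exact absurd ⟨hp, hq⟩ hpq
  | succ K ih =>
    by_cases hb : e - (↑(K + 1) : Int) * sx = p ∧ f - (↑(K + 1) : Int) * sy = q
    · rw [show pvWalk (K + 1 + 1) p q e f sx sy (e - ↑(K + 1) * sx) (f - ↑(K + 1) * sy)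
            = none from by rw [pvWalk, if_pos hb]]
      constructor
      · intro _; exact ⟨K + 1, le_rfl, hb.1.symm, hb.2.symm⟩
      · intro _; rfl
    · have hq : ¬(e - (↑(K + 1) : Int) * sx = e ∧ f - (↑(K + 1) : Int) * sy = f) := by
        rintro ⟨h1, h2⟩
        have hx0 : (↑(K + 1) : Int) * sx = 0 := by omega
        have hy0 : (↑(K + 1) : Int) * sy = 0 := by omega
        have hK0 : (↑(K + 1) : Int) ≠ 0 := by positivity
        rcases mul_eq_zero.mp hx0 with h | h
        · exact absurd h hK0
        · rcases mul_eq_zero.mp hy0 with h' | h'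
          · exact absurd h' hK0
          · exact hs ⟨h, h'⟩
      have hstepx : e - (↑(K + 1) : Int) * sx + sx = e - (K : Int) * sx := by push_cast; ring
      have hstepy : f - (↑(K + 1) : Int) * sy + sy = f - (K : Int) * sy := by push_cast; ring
      rw [show pvWalk (K + 1 + 1) p q e f sx sy (e - ↑(K + 1) * sx) (f - ↑(K + 1) * sy)
            = pvWalk (K + 1) p q e f sx sy (e - ↑K * sx) (f - ↑K * sy) from by
          rw [pvWalk, if_neg hb, if_neg hq, hstepx, hstepy], ih]
      constructor
      · rintro ⟨j, hj, hp', hq'⟩; exact ⟨j, by omega, hp', hq'⟩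
      · rintro ⟨j, hj, hp', hq'⟩
        by_cases hjk : j = K + 1
        · subst hjk; exact absurd ⟨hp'.symm, hq'.symm⟩ hb
        · exact ⟨j, by omega, hp', hq'⟩

-- case 1): the diagonal walk exits at the rook iff the rook blocks the diagonal
lemma pvDiag_char (a b c d e f : Int)
    (hrb : ¬(a = c ∧ b = d)) (hrq : ¬(a = e ∧ b = f)) (hbq : ¬(c = e ∧ d = f))
    (hd : (c - e).natAbs = (d - f).natAbs) :
    pvWalk ((e - c).natAbs + 1) a b e f
        (PySem.Int.floordiv (e - c) |e - c|) (PySem.Int.floordiv (f - d) |f - d|) c d = none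
      ↔ ((a - c).natAbs = (b - d).natAbs ∧ pvStrictlyBetween a c e ∧ pvStrictlyBetween b d f) := by
  have hce : c ≠ e := by omega
  have hdf : d ≠ f := by omega
  set K : Nat := (e - c).natAbs with hK
  rw [pvFloordiv_abs (e - c) (by omega), pvFloordiv_abs (f - d) (by omega)]
  by_cases hx : 0 < e - c <;> by_cases hy : 0 < f - d <;>
    simp only [hx, hy, if_true, if_false] <;>
  · first
    | (rw [show c = e - (K : Int) * 1 from by omega, show d = f - (K : Int) * 1 from by omega,
          pvWalk_none_iff a b e f 1 1 (by omega) hrq K]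
       constructor
       · rintro ⟨j, hj, rfl, rfl⟩
         refine ⟨by omega, ?_, ?_⟩ <;> constructor <;> omega
       · rintro ⟨hab, ⟨h1, h2⟩, ⟨h3, h4⟩⟩
         exact ⟨(e - a).toNat, by omega, by omega, by omega⟩)
    | (rw [show c = e - (K : Int) * 1 from by omega, show d = f - (K : Int) * (-1) from by omega,
          pvWalk_none_iff a b e f 1 (-1) (by omega) hrq K]
       constructor
       · rintro ⟨j, hj, rfl, rfl⟩
         refine ⟨by omega, ?_, ?_⟩ <;> constructor <;> omega
       · rintro ⟨hab, ⟨h1, h2⟩, ⟨h3, h4⟩⟩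
         exact ⟨(e - a).toNat, by omega, by omega, by omega⟩)
    | (rw [show c = e - (K : Int) * (-1) from by omega, show d = f - (K : Int) * 1 from by omega,
          pvWalk_none_iff a b e f (-1) 1 (by omega) hrq K]
       constructor
       · rintro ⟨j, hj, rfl, rfl⟩
         refine ⟨by omega, ?_, ?_⟩ <;> constructor <;> omega
       · rintro ⟨hab, ⟨h1, h2⟩, ⟨h3, h4⟩⟩
         exact ⟨(a - e).toNat, by omega, by omega, by omega⟩)
    | (rw [show c = e - (K : Int) * (-1) from by omega, show d = f - (K : Int) * (-1) from by omega,
          pvWalk_none_iff a b e f (-1) (-1) (by omega) hrq K]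
       constructor
       · rintro ⟨j, hj, rfl, rfl⟩
         refine ⟨by omega, ?_, ?_⟩ <;> constructor <;> omega
       · rintro ⟨hab, ⟨h1, h2⟩, ⟨h3, h4⟩⟩
         exact ⟨(a - e).toNat, by omega, by omega, by omega⟩)

-- case 2): the column walk exits at the bishop iff the bishop blocks the column
lemma pvCol_char (a b c d e f : Int)
    (hrb : ¬(a = c ∧ b = d)) (hrq : ¬(a = e ∧ b = f)) (hbq : ¬(c = e ∧ d = f))
    (hae : a = e) :
    pvWalk ((f - b).natAbs + 1) c d e f 0 (PySem.Int.floordiv (f - b) |f - b|) a b = none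
      ↔ (c = a ∧ pvStrictlyBetween d b f) := by
  have hbf : b ≠ f := fun h => hrq ⟨hae, h⟩
  set K : Nat := (f - b).natAbs with hK
  rw [pvFloordiv_abs (f - b) (by omega)]
  by_cases hy : 0 < f - b <;> simp only [hy, if_true, if_false] <;>
  · first
    | (rw [show a = e - (K : Int) * 0 from by omega, show b = f - (K : Int) * 1 from by omega,
          pvWalk_none_iff c d e f 0 1 (by omega) hbq K]
       constructor
       · rintro ⟨j, hj, rfl, rfl⟩
         refine ⟨by omega, by constructor <;> omega⟩
       · rintro ⟨hca, ⟨h1, h2⟩⟩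
         exact ⟨(f - d).toNat, by omega, by omega, by omega⟩)
    | (rw [show a = e - (K : Int) * 0 from by omega, show b = f - (K : Int) * (-1) from by omega,
          pvWalk_none_iff c d e f 0 (-1) (by omega) hbq K]
       constructor
       · rintro ⟨j, hj, rfl, rfl⟩
         refine ⟨by omega, by constructor <;> omega⟩
       · rintro ⟨hca, ⟨h1, h2⟩⟩
         exact ⟨(d - f).toNat, by omega, by omega, by omega⟩)

-- case 3): the row walk exits at the bishop iff the bishop blocks the row
lemma pvRow_char (a b c d e f : Int)
    (hrb : ¬(a = c ∧ b = d)) (hrq : ¬(a = e ∧ b = f)) (hbq : ¬(c = e ∧ d = f))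
    (hbf : b = f) :
    pvWalk ((e - a).natAbs + 1) c d e f (PySem.Int.floordiv (e - a) |e - a|) 0 a b = none
      ↔ (d = b ∧ pvStrictlyBetween c a e) := by
  have hae : a ≠ e := fun h => hrq ⟨h, hbf⟩
  set K : Nat := (e - a).natAbs with hK
  rw [pvFloordiv_abs (e - a) (by omega)]
  by_cases hx : 0 < e - a <;> simp only [hx, if_true, if_false] <;>
  · first
    | (rw [show a = e - (K : Int) * 1 from by omega, show b = f - (K : Int) * 0 from by omega,
          pvWalk_none_iff c d e f 1 0 (by omega) hbq K]
       constructor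
       · rintro ⟨j, hj, rfl, rfl⟩
         refine ⟨by omega, by constructor <;> omega⟩
       · rintro ⟨hdb, ⟨h1, h2⟩⟩
         exact ⟨(e - c).toNat, by omega, by omega, by omega⟩)
    | (rw [show a = e - (K : Int) * (-1) from by omega, show b = f - (K : Int) * 0 from by omega,
          pvWalk_none_iff c d e f (-1) 0 (by omega) hbq K]
       constructor
       · rintro ⟨j, hj, rfl, rfl⟩
         refine ⟨by omega, by constructor <;> omega⟩
       · rintro ⟨hdb, ⟨h1, h2⟩⟩
         exact ⟨(c - e).toNat, by omega, by omega, by omega⟩)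

-- the rook part of A (cases 2 and 3) against B's condition, for any already
-- decided bishop disjunct P that is false
lemma pvRookPart (a b c d e f : Int)
    (hrb : ¬(a = c ∧ b = d)) (hrq : ¬(a = e ∧ b = f)) (hbq : ¬(c = e ∧ d = f))
    (P : Prop) [Decidable P] (hP : ¬P) :
    ((if a = e then
        pvWalk ((f - b).natAbs + 1) c d e f 0 (PySem.Int.floordiv (f - b) |f - b|) a b
      else none).getD
     ((if b = f then
        pvWalk ((e - a).natAbs + 1) c d e f (PySem.Int.floordiv (e - a) |e - a|) 0 a b
      else none).getD 2))
    = if ((a = e ∧ ¬(c = a ∧ pvStrictlyBetween d b f)) ∨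
          (b = f ∧ ¬(d = b ∧ pvStrictlyBetween c a e))) ∨ P then 1 else 2 := by
  by_cases hae : a = e
  · rw [if_pos hae]
    rcases pvWalk_cases ((f - b).natAbs + 1) c d e f 0 (PySem.Int.floordiv (f - b) |f - b|) a b with hw | hw
    · rw [hw]
      have hblk : c = a ∧ pvStrictlyBetween d b f := (pvCol_char a b c d e f hrb hrq hbq hae).mp hw
      by_cases hbf : b = f
      · exact absurd ⟨hae, hbf⟩ hrq
      · rw [if_neg hbf]
        simp only [Option.getD_none]
        rw [if_neg]
        rintro ((⟨_, h⟩ | ⟨h, _⟩) | h)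
        · exact h hblk
        · exact hbf h
        · exact hP h
    · rw [hw]
      simp only [Option.getD_some]
      rw [if_pos]
      exact Or.inl (Or.inl ⟨hae, fun hblk => by
        rw [(pvCol_char a b c d e f hrb hrq hbq hae).mpr hblk] at hw; cases hw⟩)
  · rw [if_neg hae]
    simp only [Option.getD_none]
    by_cases hbf : b = f
    · rw [if_pos hbf]
      rcases pvWalk_cases ((e - a).natAbs + 1) c d e f (PySem.Int.floordiv (e - a) |e - a|) 0 a b with hw | hw
      · rw [hw]
        have hblk : d = b ∧ pvStrictlyBetween c a e := (pvRow_char a b c d e f hrb hrq hbq hbf).mp hw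
        simp only [Option.getD_none]
        rw [if_neg]
        rintro ((⟨h, _⟩ | ⟨_, h⟩) | h)
        · exact hae h
        · exact h hblk
        · exact hP h
      · rw [hw]
        simp only [Option.getD_some]
        rw [if_pos]
        exact Or.inl (Or.inr ⟨hbf, fun hblk => by
          rw [(pvRow_char a b c d e f hrb hrq hbq hbf).mpr hblk] at hw; cases hw⟩)
    · rw [if_neg hbf]
      simp only [Option.getD_none]
      rw [if_neg]
      rintro ((⟨h, _⟩ | ⟨h, _⟩) | h)
      · exact hae h
      · exact hbf h
      · exact hP h

-- ===== VERDICT (by name: the statement is the Claim_ definition above) =====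
theorem minMovesToCaptureTheQueen_spec : Claim_equal_minMovesToCaptureTheQueen := by
  intro a b c d e f _ hpre
  obtain ⟨hrb, hrq, hbq⟩ := hpre
  unfold Spec_minMovesToCaptureTheQueen minMovesToCaptureTheQueen minMovesToCaptureTheQueen_alt
  by_cases hd : (c - e).natAbs = (d - f).natAbs
  · rw [if_pos hd]
    rcases pvWalk_cases ((e - c).natAbs + 1) a b e f
        (PySem.Int.floordiv (e - c) |e - c|) (PySem.Int.floordiv (f - d) |f - d|) c d with hw | hw
    · rw [hw]
      simp only [Option.getD_none]
      have hblk := (pvDiag_char a b c d e f hrb hrq hbq hd).mp hw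
      exact pvRookPart a b c d e f hrb hrq hbq _ (fun ⟨_, h⟩ => h hblk)
    · rw [hw]
      simp only [Option.getD_some]
      rw [if_pos]
      exact Or.inr ⟨hd, fun hblk => by
        rw [(pvDiag_char a b c d e f hrb hrq hbq hd).mpr hblk] at hw; cases hw⟩
  · rw [if_neg hd]
    simp only [Option.getD_none]
    exact pvRookPart a b c d e f hrb hrq hbq _ (fun ⟨h, _⟩ => hd h)
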